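-- pv_equiv track=rewrite | github.com/nikita-kostin/active-time-scheduling | utils/maximum_matching.py | _get_path_between
-- ===== SOURCE A (Python) =====
-- from typing import Any, Dict, Iterable, List, Optional, Set, Tuple
--
-- def _get_path_between(u1: int, u2: int, path: Iterable[int]) -> List[int]:
--     path_between = []
--
--     state = 0
--     for u in path:
--         if u == u1:
--             state = 1
--         if state == 1 and u == u2:
--             state = 2
--         if state > 0:
--             path_between.append(u)
--         if state == 2:
--             break
--
--     return path_between
-- ===== SOURCE B (Python) =====
-- from typing import Iterable, List
--
--
-- def _get_path_between(u1: int, u2: int, path: Iterable[int]) -> List[int]: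
--     p = list(path)
--     if u1 not in p:
--         return []
--     tail = p[p.index(u1):]
--     if u2 in tail:
--         return tail[:tail.index(u2) + 1]
--     return tail
-- ===== Notes on version B (the rewrite author's own statement) =====
-- stated objective: simpler
-- what changed: Replaced the single-pass state machine with locate-then-slice: find u1's first index, take the tail from there, and cut it just after the first u2 in that tail (or keep the whole tail if u2 is absent).
import Mathlib
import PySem

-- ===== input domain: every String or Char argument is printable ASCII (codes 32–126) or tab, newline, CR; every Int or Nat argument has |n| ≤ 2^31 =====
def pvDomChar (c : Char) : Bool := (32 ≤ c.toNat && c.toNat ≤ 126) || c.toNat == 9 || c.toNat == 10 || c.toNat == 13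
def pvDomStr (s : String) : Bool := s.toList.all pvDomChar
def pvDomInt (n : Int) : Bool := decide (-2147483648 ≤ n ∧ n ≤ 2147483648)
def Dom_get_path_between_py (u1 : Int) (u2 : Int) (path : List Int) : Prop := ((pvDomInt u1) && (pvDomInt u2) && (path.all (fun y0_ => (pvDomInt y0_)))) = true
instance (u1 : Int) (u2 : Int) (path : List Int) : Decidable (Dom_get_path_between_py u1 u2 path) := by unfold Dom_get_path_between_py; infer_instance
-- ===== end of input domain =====

-- B replaces A's single-pass state machine with locate-then-slice (find u1, then cut the tail at the first u2); objective: simpler.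


-- ===== PORT A =====
-- A's loop: state 0 = before u1, 1 = copying, 2 = just appended u2 (break).
def get_path_between_go (u1 : Int) (u2 : Int) (state : Int) : List Int → List Int
  | [] => []
  | u :: rest =>
    let s1 := if u = u1 then 1 else state
    let s2 := if s1 = 1 ∧ u = u2 then 2 else s1
    let appended := if s2 > 0 then [u] else []
    if s2 = 2 then appended else appended ++ get_path_between_go u1 u2 s2 rest

def get_path_between_py (u1 : Int) (u2 : Int) (path : List Int) : List Int :=
  get_path_between_go u1 u2 0 path

-- ===== PORT B =====
-- p.index / slices at nonnegative indices ported via PySem.List.index? and drop/take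
-- (PySem.List.slice_from_natCast / slice_to_natCast).
def get_path_between_py_alt (u1 : Int) (u2 : Int) (path : List Int) : List Int :=
  match PySem.List.index? path u1 with
  | none => []
  | some i1 =>
    let tail := path.drop i1
    match PySem.List.index? tail u2 with
    | some j => tail.take (j + 1)
    | none => tail

-- ===== PRECONDITION & SPEC =====
def Spec_get_path_between_py (u1 : Int) (u2 : Int) (path : List Int) (out : List Int) : Prop := out = get_path_between_py_alt u1 u2 path
instance (u1 : Int) (u2 : Int) (path : List Int) (out : List Int) : Decidable (Spec_get_path_between_py u1 u2 path out) := by unfold Spec_get_path_between_py; infer_instance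

-- ===== CLAIM (what is proved, stated in full; the proofs are below) =====
def Claim_equal_get_path_between_py : Prop := ∀ (u1 : Int) (u2 : Int) (path : List Int), Dom_get_path_between_py u1 u2 path → Spec_get_path_between_py u1 u2 path (get_path_between_py u1 u2 path)

-- ===== LEMMAS AND PROOFS =====

-- Once state = 1, the loop copies elements up to and including the first u2 (or all of them).
theorem get_path_between_go_one (u1 u2 : Int) (l : List Int) :
    get_path_between_go u1 u2 1 l =
      match PySem.List.index? l u2 with
      | some j => l.take (j + 1)
      | none => l := by
  induction l with
  | nil => simp [get_path_between_go, PySem.List.index?]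
  | cons u rest ih =>
    by_cases h2 : u = u2
    · subst h2
      rw [PySem.List.index?_cons_self]
      simp [get_path_between_go]
    · rw [PySem.List.index?_cons_of_ne rest h2]
      cases hj : PySem.List.index? rest u2 <;>
        rw [PySem.List.index?_eq_idxOf?] at hj <;>
        simp [get_path_between_go, h2, ih, hj, PySem.List.index?_eq_idxOf?, List.take_succ_cons]

-- From state 0 the loop computes B's locate-then-slice value.
theorem get_path_between_go_zero (u1 u2 : Int) (l : List Int) :
    get_path_between_go u1 u2 0 l = get_path_between_py_alt u1 u2 l := by
  induction l with
  | nil => simp [get_path_between_go, get_path_between_py_alt, PySem.List.index?]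
  | cons u rest ih =>
    by_cases h1 : u = u1
    · subst h1
      unfold get_path_between_py_alt
      rw [PySem.List.index?_cons_self]
      simp only [List.drop_zero]
      by_cases h2 : u = u2
      · subst h2
        rw [PySem.List.index?_cons_self]
        simp [get_path_between_go]
      · rw [PySem.List.index?_cons_of_ne rest h2]
        have h1' : get_path_between_go u u2 1 rest =
            match PySem.List.index? rest u2 with
            | some j => rest.take (j + 1)
            | none => rest := get_path_between_go_one u u2 rest
        cases hj : PySem.List.index? rest u2 <;>
          rw [PySem.List.index?_eq_idxOf?] at hj <;>
          simp_all [get_path_between_go, PySem.List.index?_eq_idxOf?, List.take_succ_cons]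
    · unfold get_path_between_py_alt
      rw [PySem.List.index?_cons_of_ne rest h1]
      unfold get_path_between_py_alt at ih
      cases hi : PySem.List.index? rest u1 <;>
        rw [PySem.List.index?_eq_idxOf?] at hi <;>
        simp_all [get_path_between_go, PySem.List.index?_eq_idxOf?]

-- ===== VERDICT (by name: the statement is the Claim_ definition above) =====
theorem get_path_between_py_spec : Claim_equal_get_path_between_py := by
  intro u1 u2 path _
  unfold Spec_get_path_between_py get_path_between_py
  exact get_path_between_go_zero u1 u2 path
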